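-- pv_equiv track=rewrite | github.com/sasasayusuke/util | pg/sanwa-main/FastAPI/app/utils/string_utils.py | convert_cell_to_rc
-- ===== SOURCE A (Python) =====
-- alphabet = "ABCDEFGHIJKLMNOPQRSTUVWXYZ"
--
-- def convert_cell_to_rc(cell):
--     """
--     Excelのセルアドレスを行番号と列番号に変換する関数
--         例：
--             "A1" -> (1, 1)
--             "BC23" -> (23, 55)
--
--     Args:
--         cell (str): A1形式のセル参照(例："A1", "BC23")
--
--     Returns:
--         tuple: (行番号, 列番号)
--     """
--
--     # アルファベット部分と数字部分を分離
--     alpha = ""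
--     num = ""
--
--     for char in cell:
--         if char.isalpha():
--             alpha += char
--         elif char.isdigit():
--             num += char
--
--     # アルファベットを数値に変換
--     col = convert_a_to_1(alpha)
--     # 文字列の数字をintに変換
--     row = int(num)
--
--     return row, col
--
-- def convert_a_to_1(string):
--     """
--     アルファベット文字列を26進数的な数値に変換する関数
--         例:
--             A→1, B→2, Z→26, AA→27, BC→55
--     Args:
--         string: 変換するアルファベット文字列
--     Returns:
--         変換後の数値
--     """
--     count = 0
--     for i in range(len(string)):
--         j = len(string) - i - 1
--         count += (alphabet.index(string.upper()[j]) + 1) * (len(alphabet) ** i)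
--     return count
-- ===== SOURCE B (Python) =====
-- alphabet = "ABCDEFGHIJKLMNOPQRSTUVWXYZ"
--
-- def convert_cell_to_rc(cell):
--     # Single pass: Horner accumulation of the column, digits collected as we go.
--     col = 0
--     num = ""
--     for char in cell:
--         if char.isalpha():
--             col = col * 26 + (alphabet.index(char.upper()) + 1)
--         elif char.isdigit():
--             num += char
--     return int(num), col
-- ===== Notes on version B (the rewrite author's own statement) =====
-- stated objective: simpler
-- what changed: A's two passes (collect letters+digits, then a separate right-to-left loop computing alphabet.index * 26**i powers) are merged into one pass that accumulates the column by Horner's rule (col = col*26 + value) with no power computation.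
import Mathlib
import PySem

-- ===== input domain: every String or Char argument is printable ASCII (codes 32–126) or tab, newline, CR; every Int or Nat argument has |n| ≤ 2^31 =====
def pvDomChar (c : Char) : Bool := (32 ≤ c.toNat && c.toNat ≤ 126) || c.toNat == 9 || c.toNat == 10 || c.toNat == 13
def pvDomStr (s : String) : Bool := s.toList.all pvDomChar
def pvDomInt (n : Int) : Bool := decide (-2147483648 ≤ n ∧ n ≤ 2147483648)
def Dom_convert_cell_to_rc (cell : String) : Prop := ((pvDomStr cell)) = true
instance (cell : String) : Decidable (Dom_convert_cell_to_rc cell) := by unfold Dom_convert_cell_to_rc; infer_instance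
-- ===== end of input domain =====

-- B merges A's two passes into one loop that accumulates the column by Horner's rule (col*26 + value),
-- dropping A's separate right-to-left power loop; objective: simpler.

-- ===== PORT A =====
-- the module constant  alphabet = "ABCDEFGHIJKLMNOPQRSTUVWXYZ"
def pvAlpha : List Char := "ABCDEFGHIJKLMNOPQRSTUVWXYZ".toList

-- helper convert_a_to_1: for i in range(len(string)): j = len-i-1; count += (alphabet.index(string.upper()[j]) + 1) * len(alphabet)**i
-- alphabet.index(c) is ported as PySem.Chars.find pvAlpha [c] (on this call it never misses: c is an
-- uppercased letter); string.upper()[j] via PySem.List.pyGet? with none ↦ 0 (j is always in range).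
def convert_a_to_1 (s : List Char) : Int :=
  (PySem.List.pyRange 0 (s.length : Int)).foldl
    (fun count i =>
      count +
        ((PySem.List.pyGet? (PySem.Chars.upper s) ((s.length : Int) - i - 1)).elim 0
            (fun c => PySem.Chars.find pvAlpha [c] + 1)) *
          (pvAlpha.length : Int) ^ i.toNat)
    0

def convert_cell_to_rc (cell : String) : Int × Int :=
  -- split into alphabetic part and digit part, in one pass over the characters
  let p := cell.toList.foldl
    (fun (p : List Char × List Char) char =>
      if PySem.Chars.isalpha char then (p.1 ++ [char], p.2)
      else if PySem.Chars.isdigit char then (p.1, p.2 ++ [char]) else p)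
    ([], [])
  let col := convert_a_to_1 p.1
  -- row = int(num): PySem.Int.ofChars? is none exactly where Python raises ValueError (excluded by Pre_)
  let row := (PySem.Int.ofChars? p.2).getD 0
  (row, col)

-- ===== PORT B =====
def convert_cell_to_rc_alt (cell : String) : Int × Int :=
  let p := cell.toList.foldl
    (fun (p : Int × List Char) char =>
      if PySem.Chars.isalpha char then
        (p.1 * 26 + (PySem.Chars.find pvAlpha [PySem.Chars.upperChar char] + 1), p.2)
      else if PySem.Chars.isdigit char then (p.1, p.2 ++ [char]) else p)
    (0, [])
  ((PySem.Int.ofChars? p.2).getD 0, p.1)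

-- ===== PRECONDITION & SPEC =====
-- A raises ValueError (int of the empty collected digit string) when cell contains no digit; Pre_ requires a digit.
def Pre_convert_cell_to_rc (cell : String) : Prop :=
  (cell.toList.any fun c => PySem.Chars.isdigit c) = true
instance (cell : String) : Decidable (Pre_convert_cell_to_rc cell) := by unfold Pre_convert_cell_to_rc; infer_instance
def pvWitness_convert_cell_to_rc : String := "BC23"
def Spec_convert_cell_to_rc (cell : String) (out : Int × Int) : Prop := out = convert_cell_to_rc_alt cell
instance (cell : String) (out : Int × Int) : Decidable (Spec_convert_cell_to_rc cell out) := by unfold Spec_convert_cell_to_rc; infer_instance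

-- ===== CLAIM (what is proved, stated in full; the proofs are below) =====
def Claim_equal_convert_cell_to_rc : Prop := ∀ (cell : String), Dom_convert_cell_to_rc cell → Pre_convert_cell_to_rc cell → Spec_convert_cell_to_rc cell (convert_cell_to_rc cell)

-- ===== LEMMAS AND PROOFS =====

-- the per-character column value both programs use
def pvVal (c : Char) : Int := PySem.Chars.find pvAlpha [PySem.Chars.upperChar c] + 1

-- Horner fold (the shape of B's column accumulation), with an explicit accumulator
def pvHorner (a : Int) (l : List Char) : Int :=
  l.foldl (fun c ch => c * 26 + pvVal ch) a

theorem pvHorner_acc (l : List Char) (a : Int) :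
    pvHorner a l = a * 26 ^ l.length + pvHorner 0 l := by
  induction l generalizing a with
  | nil => simp [pvHorner]
  | cons c l ih =>
    simp only [pvHorner, List.foldl_cons, List.length_cons] at *
    rw [ih (a * 26 + pvVal c), ih (0 * 26 + pvVal c)]
    ring

theorem convert_a_to_1_cons (c : Char) (l : List Char) :
    convert_a_to_1 (c :: l) = convert_a_to_1 l + pvVal c * 26 ^ l.length := by
  unfold convert_a_to_1
  have hlen : ((c :: l).length : Int) = (l.length : Int) + 1 := by
    simp
  rw [hlen, PySem.List.pyRange_one_succ_right (by positivity)]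
  rw [List.foldl_concat]
  have hcong :
      List.foldl
        (fun count i =>
          count +
            ((PySem.List.pyGet? (PySem.Chars.upper (c :: l)) ((l.length : Int) + 1 - i - 1)).elim 0
                (fun ch => PySem.Chars.find pvAlpha [ch] + 1)) *
              (pvAlpha.length : Int) ^ i.toNat)
        0 (PySem.List.pyRange 0 (l.length : Int)) =
      List.foldl
        (fun count i =>
          count +
            ((PySem.List.pyGet? (PySem.Chars.upper l) ((l.length : Int) - i - 1)).elim 0
                (fun ch => PySem.Chars.find pvAlpha [ch] + 1)) *
              (pvAlpha.length : Int) ^ i.toNat)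
        0 (PySem.List.pyRange 0 (l.length : Int)) := by
    apply PySem.List.foldl_congr_mem
    intro acc i hi
    rw [PySem.List.mem_pyRange_one] at hi
    have hidx : (l.length : Int) + 1 - i - 1 = ((l.length - i.toNat : Nat) : Int) := by
      omega
    have hidx' : ((l.length : Int)) - i - 1 = ((l.length - 1 - i.toNat : Nat) : Int) := by
      omega
    rw [hidx, hidx', PySem.List.pyGet?_natCast, PySem.List.pyGet?_natCast]
    have hk : l.length - i.toNat = (l.length - 1 - i.toNat) + 1 := by omega
    simp only [PySem.Chars.upper, List.map_cons, hk, List.getElem?_cons_succ]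
  rw [hcong]
  -- the appended term reads index ((len+1) - len - 1) = 0, the new head character
  have h0 : (l.length : Int) + 1 - (l.length : Int) - 1 = ((0 : Nat) : Int) := by
    omega
  rw [h0, PySem.List.pyGet?_natCast]
  simp [PySem.Chars.upper, pvVal, pvAlpha]

theorem convert_a_to_1_eq_horner (l : List Char) :
    convert_a_to_1 l = pvHorner 0 l := by
  induction l with
  | nil => rfl
  | cons c l ih =>
    rw [convert_a_to_1_cons, ih]
    show pvHorner 0 l + pvVal c * 26 ^ l.length = pvHorner (0 * 26 + pvVal c) l
    rw [show (0 : Int) * 26 + pvVal c = pvVal c from by ring, pvHorner_acc l (pvVal c)]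
    ring

-- the loop invariant tying B's single pass to A's splitting pass
theorem pv_fold_inv (l : List Char) (a n : List Char) :
    List.foldl
      (fun (p : Int × List Char) char =>
        if PySem.Chars.isalpha char then
          (p.1 * 26 + (PySem.Chars.find pvAlpha [PySem.Chars.upperChar char] + 1), p.2)
        else if PySem.Chars.isdigit char then (p.1, p.2 ++ [char]) else p)
      (pvHorner 0 a, n) l =
    (pvHorner 0
        (List.foldl
          (fun (p : List Char × List Char) char =>
            if PySem.Chars.isalpha char then (p.1 ++ [char], p.2)
            else if PySem.Chars.isdigit char then (p.1, p.2 ++ [char]) else p)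
          (a, n) l).1,
      (List.foldl
          (fun (p : List Char × List Char) char =>
            if PySem.Chars.isalpha char then (p.1 ++ [char], p.2)
            else if PySem.Chars.isdigit char then (p.1, p.2 ++ [char]) else p)
          (a, n) l).2) := by
  induction l generalizing a n with
  | nil => simp
  | cons c l ih =>
    simp only [List.foldl_cons]
    by_cases ha : PySem.Chars.isalpha c
    · simp only [ha, if_true]
      have : pvHorner 0 a * 26 + (PySem.Chars.find pvAlpha [PySem.Chars.upperChar c] + 1) =
          pvHorner 0 (a ++ [c]) := by
        simp [pvHorner, pvVal]
      rw [this]; exact ih (a ++ [c]) n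
    · by_cases hd : PySem.Chars.isdigit c
      · simp only [ha, hd, if_true]
        exact ih a (n ++ [c])
      · simp only [ha, hd]
        exact ih a n

-- ===== VERDICT (by name: the statement is the Claim_ definition above) =====
theorem convert_cell_to_rc_spec : Claim_equal_convert_cell_to_rc := by
  intro cell _ _
  show convert_cell_to_rc cell = convert_cell_to_rc_alt cell
  have h := pv_fold_inv cell.toList [] []
  simp only [pvHorner, List.foldl_nil] at h
  simp only [convert_cell_to_rc, convert_cell_to_rc_alt, h, convert_a_to_1_eq_horner, pvHorner]
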